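-- pv_equiv track=rewrite | github.com/JUMINAHN/TIL | Algorithm/IM_test/BOJ/0831/b1652.py | col_check
-- ===== SOURCE A (Python) =====
-- def col_check(N, barrier, room):
--     total = 0
--     # 먼저 행 순회
--     for col in range(N):
--         #store = 0 #보관
--         col_count = 0
--         for row in range(N):
--             if room[row][col] == '.':
--                 col_count += 1
--             else:  # X를 만나게 되면
--                 if col_count >= barrier:
--                     total += 1 #누울자리 count하고
--                 col_count = 0 #row count를 0으로 만들어 줘
--         if col_count >= barrier:
--             total += 1
--     return total
-- ===== SOURCE B (Python) =====
-- def col_check(N, barrier, room):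
--     # Row-major single pass: one run-length accumulator per column.
--     counts = [0] * N
--     total = 0
--     for row in range(N):
--         new_counts = []
--         for ch, c in zip(room[row], counts):
--             if ch == '.':
--                 new_counts.append(c + 1)
--             else:
--                 if c >= barrier:
--                     total += 1
--                 new_counts.append(0)
--         counts = new_counts
--     for c in counts:
--         if c >= barrier:
--             total += 1
--     return total
-- ===== Notes on version B (the rewrite author's own statement) =====
-- stated objective: alternative
-- what changed: Replaces A's column-major double loop (one scalar run counter, re-indexing room[row][col] per cell) with a single row-major pass that maintains a vector of per-column run-length accumulators updated via zip over each row, plus one final flush loop.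
import Mathlib
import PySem

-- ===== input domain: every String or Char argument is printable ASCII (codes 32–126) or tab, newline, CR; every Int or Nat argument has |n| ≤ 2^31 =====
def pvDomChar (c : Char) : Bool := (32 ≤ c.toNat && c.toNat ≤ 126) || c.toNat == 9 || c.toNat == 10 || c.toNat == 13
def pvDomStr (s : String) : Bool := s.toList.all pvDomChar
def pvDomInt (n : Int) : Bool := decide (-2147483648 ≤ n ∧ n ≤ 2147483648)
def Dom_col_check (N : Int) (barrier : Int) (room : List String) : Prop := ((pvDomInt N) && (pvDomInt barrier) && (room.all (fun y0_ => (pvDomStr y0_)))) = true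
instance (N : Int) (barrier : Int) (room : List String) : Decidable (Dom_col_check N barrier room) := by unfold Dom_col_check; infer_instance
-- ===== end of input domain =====

-- B replaces A's column-major double loop by one row-major pass with a vector of
-- per-column run-length accumulators (objective: alternative decomposition, same cost).

-- ===== PORT A =====
-- room[row][col], '?' default only reached outside Pre_ (Python raises IndexError there)
def pvCell (room : List String) (row col : Int) : Char :=
  ((PySem.List.pyGet? room row).bind (fun s => PySem.Str.pyGet? s col)).getD '?'

def col_check (N : Int) (barrier : Int) (room : List String) : Int :=
  (PySem.List.pyRange 0 N 1).foldl (fun total col =>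
    let p := (PySem.List.pyRange 0 N 1).foldl (fun (tc : Int × Int) row =>
      if pvCell room row col = '.' then (tc.1, tc.2 + 1)
      else if barrier ≤ tc.2 then (tc.1 + 1, 0) else (tc.1, 0)) (total, 0)
    if barrier ≤ p.2 then p.1 + 1 else p.1) 0

-- ===== PORT B =====
def col_check_alt (N : Int) (barrier : Int) (room : List String) : Int :=
  let st := (PySem.List.pyRange 0 N 1).foldl (fun (ct : List Int × Int) row =>
      ((PySem.List.pyGetD room row "").toList.zip ct.1).foldl
        (fun (nt : List Int × Int) p =>
          if p.1 = '.' then (nt.1 ++ [p.2 + 1], nt.2)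
          else if barrier ≤ p.2 then (nt.1 ++ [(0 : Int)], nt.2 + 1)
          else (nt.1 ++ [(0 : Int)], nt.2)) ([], ct.2))
    (List.replicate N.toNat 0, 0)
  st.1.foldl (fun total c => if barrier ≤ c then total + 1 else total) st.2

-- ===== PRECONDITION & SPEC =====
-- Pre_ excludes exactly the inputs on which Python A raises IndexError:
-- fewer than N rows, or one of the first N rows shorter than N characters.
def Pre_col_check (N : Int) (barrier : Int) (room : List String) : Prop :=
  N ≤ (room.length : Int) ∧ ∀ s ∈ room.take N.toNat, N ≤ (s.toList.length : Int)
instance (N : Int) (barrier : Int) (room : List String) : Decidable (Pre_col_check N barrier room) := by unfold Pre_col_check; infer_instance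

def pvWitness_col_check : Int × Int × List String := (2, 1, [".X", ".."])

def Spec_col_check (N : Int) (barrier : Int) (room : List String) (out : Int) : Prop := out = col_check_alt N barrier room
instance (N : Int) (barrier : Int) (room : List String) (out : Int) : Decidable (Spec_col_check N barrier room out) := by unfold Spec_col_check; infer_instance

-- ===== CLAIM (what is proved, stated in full; the proofs are below) =====
def Claim_equal_col_check : Prop := ∀ (N : Int) (barrier : Int) (room : List String), Dom_col_check N barrier room → Pre_col_check N barrier room → Spec_col_check N barrier room (col_check N barrier room)

-- ===== LEMMAS AND PROOFS =====

-- one cell's transition of the (total, run) state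
def pvStep (b : Int) (tc : Int × Int) (ch : Char) : Int × Int :=
  if ch = '.' then (tc.1, tc.2 + 1)
  else if b ≤ tc.2 then (tc.1 + 1, 0) else (tc.1, 0)

def pvProc (b : Int) (cs : List Char) (tc : Int × Int) : Int × Int := cs.foldl (pvStep b) tc

-- the first N lines of the grid, as char lists
def pvLines (room : List String) (n : Nat) : List (List Char) :=
  (List.range n).map (fun (r : Nat) => (PySem.List.pyGetD room (r : Int) "").toList)

def pvCol (rows : List (List Char)) (i : Nat) : List Char :=
  rows.map (fun l => l.getD i '?')

-- per-column final contribution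
def pvColTotal (b : Int) (cs : List Char) : Int :=
  (pvProc b cs (0, 0)).1 + (if b ≤ (pvProc b cs (0, 0)).2 then 1 else 0)

lemma pvStep_add (b t c : Int) (ch : Char) :
    pvStep b (t, c) ch = ((pvStep b (0, c) ch).1 + t, (pvStep b (0, c) ch).2) := by
  simp only [pvStep]
  split_ifs <;> simp [Prod.ext_iff] <;> omega

lemma pvProc_add (b : Int) (cs : List Char) : ∀ (t c : Int),
    pvProc b cs (t, c) = ((pvProc b cs (0, c)).1 + t, (pvProc b cs (0, c)).2) := by
  induction cs with
  | nil => intro t c; simp [pvProc]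
  | cons ch cs ih =>
    intro t c
    simp only [pvProc, List.foldl_cons] at *
    rw [pvStep_add]
    rw [ih ((pvStep b (0, c) ch).1 + t) (pvStep b (0, c) ch).2,
        ih (pvStep b (0, c) ch).1 (pvStep b (0, c) ch).2]
    apply Prod.ext
    · simp only []
      ring
    · rfl

lemma pv_map_getD_range {α : Type} (l : List α) (d : α) :
    (List.range l.length).map (fun r => l.getD r d) = l := by
  apply List.ext_getElem
  · simp
  · intro i h1 h2
    simp [List.getD_eq_getElem?_getD, List.getElem?_eq_getElem h2]

lemma pv_map_getD_range' {α : Type} (l : List α) (d : α) (n : Nat) (h : l.length = n) :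
    (List.range n).map (fun r => l.getD r d) = l := by
  subst h; exact pv_map_getD_range l d

lemma pv_getD_map_range {α : Type} (f : Nat → α) (n i : Nat) (hi : i < n) (d : α) :
    ((List.range n).map f).getD i d = f i := by
  rw [List.getD_eq_getElem?_getD, List.getElem?_map, List.getElem?_range hi]
  rfl

lemma pv_foldl_congr {α β : Type} (l : List β) (f g : α → β → α) (init : α)
    (h : ∀ acc x, x ∈ l → f acc x = g acc x) : l.foldl f init = l.foldl g init :=
  PySem.List.foldl_congr_mem l f g init h

lemma pvProc_cons (b : Int) (ch : Char) (cs : List Char) (tc : Int × Int) :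
    pvProc b (ch :: cs) tc = pvProc b cs (pvStep b tc ch) := rfl

-- counting fold = init + sum of 0/1 indicators
lemma pv_foldl_count (b : Int) (l : List Int) : ∀ (s : Int),
    l.foldl (fun total c => if b ≤ c then total + 1 else total) s
      = s + (l.map (fun c => if b ≤ c then (1 : Int) else 0)).sum := by
  induction l with
  | nil => intro s; simp
  | cons c l ih => intro s; simp only [List.foldl_cons, List.map_cons, List.sum_cons]
                   rw [ih]; split_ifs <;> ring

-- B's inner (per-row) loop, explicitly
def pvRowF (b : Int) (ct : List Int × Int) (l : List Char) : List Int × Int :=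
  (l.zip ct.1).foldl
    (fun (nt : List Int × Int) p =>
      if p.1 = '.' then (nt.1 ++ [p.2 + 1], nt.2)
      else if b ≤ p.2 then (nt.1 ++ [(0 : Int)], nt.2 + 1)
      else (nt.1 ++ [(0 : Int)], nt.2)) ([], ct.2)

lemma pvRowB (b : Int) (pairs : List (Char × Int)) : ∀ (acc : List Int) (t : Int),
    pairs.foldl
      (fun (nt : List Int × Int) p =>
        if p.1 = '.' then (nt.1 ++ [p.2 + 1], nt.2)
        else if b ≤ p.2 then (nt.1 ++ [(0 : Int)], nt.2 + 1)
        else (nt.1 ++ [(0 : Int)], nt.2)) (acc, t)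
      = (acc ++ pairs.map (fun p => (pvStep b (0, p.2) p.1).2),
         t + (pairs.map (fun p => (pvStep b (0, p.2) p.1).1)).sum) := by
  induction pairs with
  | nil => intro acc t; simp
  | cons p ps ih =>
    intro acc t
    simp only [List.foldl_cons, List.map_cons, List.sum_cons]
    have hstep : (if p.1 = '.' then (acc ++ [p.2 + 1], t)
          else if b ≤ p.2 then (acc ++ [(0:Int)], t + 1) else (acc ++ [(0:Int)], t))
        = (acc ++ [(pvStep b (0, p.2) p.1).2], t + (pvStep b (0, p.2) p.1).1) := by
      simp only [pvStep]
      split_ifs <;> simp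
    rw [hstep, ih]
    apply Prod.ext
    · simp
    · simp only []
      ring

lemma pvOuterB (b : Int) (rows : List (List Char)) : ∀ (counts : List Int) (t : Int),
    (∀ l ∈ rows, counts.length ≤ l.length) →
    rows.foldl (pvRowF b) (counts, t)
      = ((List.range counts.length).map
           (fun i => (pvProc b (pvCol rows i) (0, counts.getD i 0)).2),
         t + ((List.range counts.length).map
           (fun i => (pvProc b (pvCol rows i) (0, counts.getD i 0)).1)).sum) := by
  induction rows with
  | nil =>
    intro counts t _
    simp only [List.foldl_nil, pvCol, List.map_nil, pvProc, Prod.mk.injEq]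
    rw [pv_map_getD_range]
    simp
  | cons l rest ih =>
    intro counts t hlen
    have hl : counts.length ≤ l.length := hlen l (by simp)
    have hzip : l.zip counts
        = (List.range counts.length).map (fun i => (l.getD i '?', counts.getD i 0)) := by
      apply List.ext_getElem
      · simp [Nat.min_eq_right hl]
      · intro i h1 h2
        have hi : i < counts.length := by simpa using h2
        have hil : i < l.length := lt_of_lt_of_le hi hl
        simp [List.getElem_zip, List.getD_eq_getElem?_getD,
              List.getElem?_eq_getElem hil, List.getElem?_eq_getElem hi]
    have hrow : pvRowF b (counts, t) l
        = ((l.zip counts).map (fun p => (pvStep b (0, p.2) p.1).2),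
           t + ((l.zip counts).map (fun p => (pvStep b (0, p.2) p.1).1)).sum) := by
      simp [pvRowF, pvRowB]
    simp only [List.foldl_cons]
    rw [hrow, hzip]
    simp only [List.map_map]
    rw [ih ((List.range counts.length).map
          ((fun p => (pvStep b (0, p.2) p.1).2) ∘ fun i => (l.getD i '?', counts.getD i 0))) _
        (by intro l' hl'
            simpa using hlen l' (List.mem_cons_of_mem _ hl'))]
    simp only [List.length_map, List.length_range]
    have hgetD : ∀ i, i < counts.length →
        ((List.range counts.length).map
          ((fun p => (pvStep b (0, p.2) p.1).2) ∘ fun i => (l.getD i '?', counts.getD i 0))).getD i 0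
        = (pvStep b (0, counts.getD i 0) (l.getD i '?')).2 :=
      fun i hi => pv_getD_map_range _ _ _ hi _
    have hcolcons : ∀ i : Nat, pvCol (l :: rest) i = l.getD i '?' :: pvCol rest i :=
      fun i => rfl
    apply Prod.ext
    · simp only []
      apply List.map_congr_left
      intro i hi
      simp only [List.mem_range] at hi
      rw [hgetD i hi, hcolcons i, pvProc_cons]
      conv_rhs => rw [show pvStep b (0, counts.getD i 0) (l.getD i '?')
            = ((pvStep b (0, counts.getD i 0) (l.getD i '?')).1,
               (pvStep b (0, counts.getD i 0) (l.getD i '?')).2) from rfl,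
          pvProc_add]
    · simp only []
      have hrhs : ∀ i ∈ List.range counts.length,
          (pvProc b (pvCol (l :: rest) i) (0, counts.getD i 0)).1
          = (pvStep b (0, counts.getD i 0) (l.getD i '?')).1
            + (pvProc b (pvCol rest i)
                (0, (pvStep b (0, counts.getD i 0) (l.getD i '?')).2)).1 := by
        intro i _
        rw [hcolcons i, pvProc_cons]
        conv_lhs => rw [show pvStep b (0, counts.getD i 0) (l.getD i '?')
              = ((pvStep b (0, counts.getD i 0) (l.getD i '?')).1,
                 (pvStep b (0, counts.getD i 0) (l.getD i '?')).2) from rfl,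
            pvProc_add]
        simp only []
        ring
      rw [List.map_congr_left hrhs, PySem.List.sum_map_add_int]
      have hlhs : ∀ i ∈ List.range counts.length,
          (pvProc b (pvCol rest i)
            (0, ((List.range counts.length).map
              ((fun p => (pvStep b (0, p.2) p.1).2) ∘ fun i => (l.getD i '?', counts.getD i 0))).getD i 0)).1
          = (pvProc b (pvCol rest i)
              (0, (pvStep b (0, counts.getD i 0) (l.getD i '?')).2)).1 := by
        intro i hi
        simp only [List.mem_range] at hi
        rw [hgetD i hi]
      rw [List.map_congr_left hlhs]
      have hcomp : (List.range counts.length).map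
            ((fun p => (pvStep b (0, p.2) p.1).1) ∘ fun i => (l.getD i '?', counts.getD i 0))
          = (List.range counts.length).map
            (fun a => (pvStep b (0, counts.getD a 0) (l.getD a '?')).1) := rfl
      rw [hcomp]
      ring

-- ===== the A side =====

lemma pvA_inner (N b : Int) (room : List String) (hpre : Pre_col_check N b room)
    (i : Nat) (hi : i < N.toNat) (tc : Int × Int) :
    (PySem.List.pyRange 0 N 1).foldl (fun (tc : Int × Int) row =>
      if pvCell room row (i : Int) = '.' then (tc.1, tc.2 + 1)
      else if b ≤ tc.2 then (tc.1 + 1, 0) else (tc.1, 0)) tc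
    = pvProc b (pvCol (pvLines room N.toNat) i) tc := by
  obtain ⟨h1, h2⟩ := hpre
  have hn : N.toNat ≤ room.length := by omega
  rw [PySem.List.pyRange_one, List.foldl_map]
  have hsub : (N - 0).toNat = N.toNat := by omega
  rw [hsub]
  have hcell : ∀ (tc : Int × Int) (r : Nat), r ∈ List.range N.toNat →
      (if pvCell room ((0 : Int) + (r : Int)) (i : Int) = '.' then (tc.1, tc.2 + 1)
       else if b ≤ tc.2 then (tc.1 + 1, 0) else (tc.1, 0))
      = pvStep b tc ((pvCol (pvLines room N.toNat) i).getD r '?') := by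
    intro tc r hr
    simp only [List.mem_range] at hr
    have hrl : r < room.length := by omega
    have hline : N.toNat ≤ room[r].toList.length := by
      have hmem : room[r] ∈ room.take N.toNat := by
        have : (room.take N.toNat)[r]'(by simp; omega) = room[r] := by
          simp [List.getElem_take]
        rw [← this]; exact List.getElem_mem _
      have := h2 _ hmem
      omega
    have hcellval : pvCell room ((0 : Int) + (r : Int)) (i : Int)
        = room[r].toList.getD i '?' := by
      simp only [pvCell, zero_add]
      rw [PySem.List.pyGet?_natCast]
      rw [List.getElem?_eq_getElem hrl]
      simp [List.getD_eq_getElem?_getD,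
            List.getElem?_eq_getElem (by omega : i < room[r].toList.length)]
    have hr' : r < (pvLines room N.toNat).length := by
      simp [pvLines]; omega
    have hline2 : (pvLines room N.toNat).getD r [] = room[r].toList := by
      rw [pvLines, pv_getD_map_range _ _ _ hr, PySem.List.pyGetD_natCast,
          List.getD_eq_getElem?_getD, List.getElem?_eq_getElem hrl]
      rfl
    have hcol : (pvCol (pvLines room N.toNat) i).getD r '?'
        = room[r].toList.getD i '?' := by
      rw [pvCol, List.getD_eq_getElem?_getD, List.getElem?_map,
          List.getElem?_eq_getElem hr']
      simp only [Option.map_some, Option.getD_some]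
      have hge : (pvLines room N.toNat)[r]'hr' = (pvLines room N.toNat).getD r [] := by
        rw [List.getD_eq_getElem?_getD, List.getElem?_eq_getElem hr']
        rfl
      rw [hge, hline2]
    rw [hcellval, hcol, pvStep]
  refine Eq.trans (pv_foldl_congr (List.range N.toNat) _ _ tc hcell) ?_
  have hlen : (pvCol (pvLines room N.toNat) i).length = N.toNat := by
    simp [pvCol, pvLines]
  rw [← List.foldl_map (f := fun r => (pvCol (pvLines room N.toNat) i).getD r '?')
       (g := pvStep b) (l := List.range N.toNat) (init := tc),
      pv_map_getD_range' _ _ _ hlen]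
  rfl

lemma pvA_eq (N b : Int) (room : List String) (hpre : Pre_col_check N b room) :
    col_check N b room
      = ((List.range N.toNat).map
          (fun i => pvColTotal b (pvCol (pvLines room N.toNat) i))).sum := by
  have hsub : (N - 0).toNat = N.toNat := by omega
  have hbody : ∀ (total : Int) (col : Int), col ∈ PySem.List.pyRange 0 N 1 →
      (let p := (PySem.List.pyRange 0 N 1).foldl (fun (tc : Int × Int) row =>
          if pvCell room row col = '.' then (tc.1, tc.2 + 1)
          else if b ≤ tc.2 then (tc.1 + 1, 0) else (tc.1, 0)) (total, 0)
       if b ≤ p.2 then p.1 + 1 else p.1)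
      = total + pvColTotal b (pvCol (pvLines room N.toNat) col.toNat) := by
    intro total col hcolmem
    rw [PySem.List.mem_pyRange_one] at hcolmem
    have hcast : ((col.toNat : Int)) = col := by omega
    have hi : col.toNat < N.toNat := by omega
    rw [← hcast, pvA_inner N b room hpre col.toNat hi (total, 0),
        pvProc_add b (pvCol (pvLines room N.toNat) col.toNat) total 0]
    simp only [pvColTotal, Int.toNat_natCast]
    split_ifs <;> ring
  unfold col_check
  refine Eq.trans (pv_foldl_congr (PySem.List.pyRange 0 N 1) _
      (fun total col => total + pvColTotal b (pvCol (pvLines room N.toNat) col.toNat))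
      0 hbody) ?_
  rw [PySem.List.foldl_add, PySem.List.pyRange_one, hsub, List.map_map]
  simp only [zero_add]
  apply congrArg List.sum
  apply List.map_congr_left
  intro k hk
  simp

-- ===== the B side =====

lemma pvB_eq (N b : Int) (room : List String) (hpre : Pre_col_check N b room) :
    col_check_alt N b room
      = ((List.range N.toNat).map
          (fun i => pvColTotal b (pvCol (pvLines room N.toNat) i))).sum := by
  obtain ⟨h1, h2⟩ := hpre
  have hn : N.toNat ≤ room.length := by omega
  have hsub : (N - 0).toNat = N.toNat := by omega
  have hbody : ∀ (ct : List Int × Int) (r : Nat), r ∈ List.range N.toNat →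
      ((PySem.List.pyGetD room ((0 : Int) + (r : Int)) "").toList.zip ct.1).foldl
        (fun (nt : List Int × Int) p =>
          if p.1 = '.' then (nt.1 ++ [p.2 + 1], nt.2)
          else if b ≤ p.2 then (nt.1 ++ [(0 : Int)], nt.2 + 1)
          else (nt.1 ++ [(0 : Int)], nt.2)) ([], ct.2)
      = pvRowF b ct ((PySem.List.pyGetD room ((r : Int)) "").toList) := by
    intro ct r _
    simp [pvRowF]
  have hLines : (List.range N.toNat).map
      (fun r : Nat => (PySem.List.pyGetD room ((r : Int)) "").toList)
      = pvLines room N.toNat := rfl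
  have hlenrows : ∀ l ∈ pvLines room N.toNat,
      (List.replicate N.toNat (0:Int)).length ≤ l.length := by
    intro l hl
    simp only [pvLines, List.mem_map, List.mem_range] at hl
    obtain ⟨r, hr, rfl⟩ := hl
    have hrl : r < room.length := by omega
    have hmem : room[r] ∈ room.take N.toNat := by
      have : (room.take N.toNat)[r]'(by simp; omega) = room[r] := by
        simp [List.getElem_take]
      rw [← this]; exact List.getElem_mem _
    have hlen := h2 _ hmem
    rw [String.length_toList] at hlen
    simp [PySem.List.pyGetD_natCast, List.getD_eq_getElem?_getD,
          List.getElem?_eq_getElem hrl]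
    omega
  have hcnt : ∀ i ∈ List.range N.toNat,
      ((List.replicate N.toNat (0:Int)).getD i 0) = (0 : Int) := by
    intro i hi
    simp only [List.mem_range] at hi
    simp [List.getD_eq_getElem?_getD, List.getElem?_eq_getElem
      (by simp; omega : i < (List.replicate N.toNat (0:Int)).length)]
  have hmap2 : ∀ i ∈ List.range N.toNat,
      (pvProc b (pvCol (pvLines room N.toNat) i)
        (0, (List.replicate N.toNat (0:Int)).getD i 0)).2
      = (pvProc b (pvCol (pvLines room N.toNat) i) (0, 0)).2 := by
    intro i hi; rw [hcnt i hi]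
  have hmap1 : ∀ i ∈ List.range N.toNat,
      (pvProc b (pvCol (pvLines room N.toNat) i)
        (0, (List.replicate N.toNat (0:Int)).getD i 0)).1
      = (pvProc b (pvCol (pvLines room N.toNat) i) (0, 0)).1 := by
    intro i hi; rw [hcnt i hi]
  have hst : (PySem.List.pyRange 0 N 1).foldl (fun (ct : List Int × Int) row =>
      ((PySem.List.pyGetD room row "").toList.zip ct.1).foldl
        (fun (nt : List Int × Int) p =>
          if p.1 = '.' then (nt.1 ++ [p.2 + 1], nt.2)
          else if b ≤ p.2 then (nt.1 ++ [(0 : Int)], nt.2 + 1)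
          else (nt.1 ++ [(0 : Int)], nt.2)) ([], ct.2))
      (List.replicate N.toNat 0, 0)
    = ((List.range N.toNat).map
         (fun i => (pvProc b (pvCol (pvLines room N.toNat) i) (0, 0)).2),
       0 + ((List.range N.toNat).map
         (fun i => (pvProc b (pvCol (pvLines room N.toNat) i) (0, 0)).1)).sum) := by
    rw [PySem.List.pyRange_one, hsub, List.foldl_map]
    refine Eq.trans (pv_foldl_congr (List.range N.toNat) _ _ _ hbody) ?_
    rw [← List.foldl_map (f := fun r : Nat => (PySem.List.pyGetD room ((r : Int)) "").toList)
         (g := pvRowF b) (l := List.range N.toNat) (init := (List.replicate N.toNat 0, 0)),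
        hLines, pvOuterB b _ _ 0 hlenrows]
    simp only [List.length_replicate]
    rw [List.map_congr_left hmap2, List.map_congr_left hmap1]
  simp only [col_check_alt, hst]
  rw [pv_foldl_count, List.map_map]
  have hcomp : ∀ i ∈ List.range N.toNat,
      ((fun c => if b ≤ c then (1:Int) else 0) ∘
        (fun i => (pvProc b (pvCol (pvLines room N.toNat) i) (0, 0)).2)) i
      = (fun i => if b ≤ (pvProc b (pvCol (pvLines room N.toNat) i) (0, 0)).2
          then (1:Int) else 0) i := by
    intro i _; rfl
  rw [List.map_congr_left hcomp]
  simp only [zero_add]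
  rw [← PySem.List.sum_map_add_int]
  simp only [pvColTotal]

-- ===== VERDICT (by name: the statement is the Claim_ definition above) =====
theorem col_check_spec : Claim_equal_col_check := by
  intro N b room _ hpre
  unfold Spec_col_check
  rw [pvA_eq N b room hpre, pvB_eq N b room hpre]
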